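-- pv_equiv track=rewrite | github.com/BRbIS/BoringPy | Char5_dictionaries/dragonLoot.py | addToInventory
-- ===== SOURCE A (Python) =====
-- def list_to_dict(ilist):
--     idict = {}
--     for v in ilist:
--         idict.setdefault(v, 0)
--         idict[v] += 1
--     return idict
--
-- def addToInventory(inventory, addedItems):
--     addedItems = list_to_dict(addedItems)
--     for i in addedItems.keys():
--         if i not in inventory:
--             inventory[i] = addedItems.get(i, 0)
--         else:
--             inventory[i] += addedItems.get(i, 0)
--     return inventory
-- ===== SOURCE B (Python) =====
-- # Single-pass accumulation: no intermediate count table; mutates and returns the same inventory dict, like A.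
-- def addToInventory(inventory, addedItems):
--     for item in addedItems:
--         inventory[item] = inventory.get(item, 0) + 1
--     return inventory
-- ===== Notes on version B (the rewrite author's own statement) =====
-- stated objective: simpler
-- what changed: Drops the separate list_to_dict counting pass and its merge loop: B accumulates each added item directly into inventory with get(item,0)+1 in one loop.
import Mathlib
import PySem

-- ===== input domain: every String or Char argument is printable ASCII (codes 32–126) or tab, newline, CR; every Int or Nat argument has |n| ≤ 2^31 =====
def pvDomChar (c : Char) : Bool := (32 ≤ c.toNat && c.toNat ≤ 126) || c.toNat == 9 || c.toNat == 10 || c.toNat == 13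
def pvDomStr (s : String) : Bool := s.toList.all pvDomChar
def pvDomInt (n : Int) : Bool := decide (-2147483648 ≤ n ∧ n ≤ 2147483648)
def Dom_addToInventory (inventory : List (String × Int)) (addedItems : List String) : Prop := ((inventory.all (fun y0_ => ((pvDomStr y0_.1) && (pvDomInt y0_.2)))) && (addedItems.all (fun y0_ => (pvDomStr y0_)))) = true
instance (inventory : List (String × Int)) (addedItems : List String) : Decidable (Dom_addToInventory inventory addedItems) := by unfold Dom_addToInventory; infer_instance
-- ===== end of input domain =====

-- B replaces A's two-phase "count addedItems into a dict, then merge it" with a single accumulation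
-- loop over addedItems (simpler); the Python A and B mutate and return the same inventory dict,
-- the equivalence proved here is about the returned value.

-- ===== PORT A =====
-- helper: idict.setdefault(v, 0); idict[v] += 1 per element
def list_to_dict (ilist : List String) : PySem.Dict String Int :=
  ilist.foldl (fun idict v => (idict.setdefault v 0).modify v 0 (· + 1)) PySem.Dict.empty

def addToInventory (inventory : List (String × Int)) (addedItems : List String) : List (String × Int) :=
  let added := list_to_dict addedItems
  (added.keys.foldl (fun inv i =>
      if inv.contains i = false then inv.insert i (added.getD i 0)
      else inv.modify i 0 (· + added.getD i 0))
    (PySem.Dict.mk inventory)).items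

-- ===== PORT B =====
def addToInventory_alt (inventory : List (String × Int)) (addedItems : List String) : List (String × Int) :=
  (addedItems.foldl (fun inv item => inv.insert item (inv.getD item 0 + 1))
    (PySem.Dict.mk inventory)).items

-- ===== PRECONDITION & SPEC =====
-- inventory is a Python dict, whose keys are necessarily unique; an association list with
-- duplicate keys represents no dict input, so those lists are outside Pre_.
def Pre_addToInventory (inventory : List (String × Int)) (addedItems : List String) : Prop :=
  (inventory.map Prod.fst).Nodup

instance (inventory : List (String × Int)) (addedItems : List String) : Decidable (Pre_addToInventory inventory addedItems) := by unfold Pre_addToInventory; infer_instance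

def pvWitness_addToInventory : (List (String × Int)) × List String :=
  ([("sword", 1), ("gold", 42)], ["gold", "ruby", "gold"])

def Spec_addToInventory (inventory : List (String × Int)) (addedItems : List String) (out : List (String × Int)) : Prop := out = addToInventory_alt inventory addedItems
instance (inventory : List (String × Int)) (addedItems : List String) (out : List (String × Int)) : Decidable (Spec_addToInventory inventory addedItems out) := by unfold Spec_addToInventory; infer_instance

-- ===== CLAIM (what is proved, stated in full; the proofs are below) =====
def Claim_equal_addToInventory : Prop := ∀ (inventory : List (String × Int)) (addedItems : List String), Dom_addToInventory inventory addedItems → Pre_addToInventory inventory addedItems → Spec_addToInventory inventory addedItems (addToInventory inventory addedItems)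

-- ===== LEMMAS AND PROOFS =====

-- A's loop step: setdefault then += 1 is one counting modify
theorem setdefault_modify_step (d : PySem.Dict String Int) (v : String) :
    (d.setdefault v 0).modify v 0 (· + 1) = d.modify v 0 (· + 1) := by
  by_cases h : d.contains v = true
  · rw [PySem.Dict.setdefault_of_contains d 0 h]
  · have h' : d.contains v = false := by simp_all
    rw [PySem.Dict.setdefault_of_not_contains d 0 h']
    show (d.insert v 0).insert v ((d.insert v 0).getD v 0 + 1) = d.insert v (d.getD v 0 + 1)
    rw [PySem.Dict.getD_insert_self, PySem.Dict.insert_insert_self,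
        PySem.Dict.getD_of_not_contains d 0 h']

-- A's counting helper is exactly collections.Counter
theorem list_to_dict_eq_counter (xs : List String) :
    list_to_dict xs = PySem.Dict.counter xs := by
  rw [list_to_dict, PySem.Dict.counter_eq_foldl]
  simp only [setdefault_modify_step]

-- dedup is idempotent
theorem ofList_idem {α : Type} [BEq α] [LawfulBEq α] (xs : List α) :
    PySem.Set.ofList (PySem.Set.ofList xs) = PySem.Set.ofList xs := by
  rw [← PySem.Set.update_nil_left (PySem.Set.ofList xs),
      PySem.Set.update_eq_append_of_disjoint _ _ (PySem.Set.nodup_ofList xs)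
        (by intro x _hx; exact List.not_mem_nil)]
  simp

-- value of a generic "insert getD+g" fold over a Nodup key list
theorem getD_foldl_insert_g (l : List String) (g : String → Int)
    (d : PySem.Dict String Int) (hl : l.Nodup) (k : String) :
    (l.foldl (fun d i => d.insert i (d.getD i 0 + g i)) d).getD k 0
      = d.getD k 0 + (if k ∈ l then g k else 0) := by
  induction l generalizing d with
  | nil => simp
  | cons i l ih =>
      simp only [List.foldl_cons]
      rcases List.nodup_cons.mp hl with ⟨hi, hl'⟩
      rw [ih _ hl']
      by_cases hk : k = i
      · subst hk
        rw [if_neg hi, PySem.Dict.getD_insert_self]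
        simp [List.mem_cons]
      · rw [PySem.Dict.getD_insert_of_ne _ _ _ hk]
        by_cases hm : k ∈ l <;> simp [hm, hk]

-- the crux: merging Counter(xs) into d equals folding xs directly into d
theorem merge_counter_eq (xs : List String) (d : PySem.Dict String Int)
    (hd : d.keys.Nodup) :
    (PySem.Dict.counter xs).keys.foldl (fun inv i =>
        if inv.contains i = false then inv.insert i ((PySem.Dict.counter xs).getD i 0)
        else inv.modify i 0 (· + (PySem.Dict.counter xs).getD i 0)) d
      = xs.foldl (fun inv item => inv.insert item (inv.getD item 0 + 1)) d := by
  have hbody : (fun (inv : PySem.Dict String Int) (i : String) =>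
        if inv.contains i = false then inv.insert i ((PySem.Dict.counter xs).getD i 0)
        else inv.modify i 0 (· + (PySem.Dict.counter xs).getD i 0))
      = fun inv i => inv.insert i (inv.getD i 0 + (xs.count i : Int)) := by
    funext inv i
    rw [PySem.Dict.getD_counter]
    by_cases h : inv.contains i = false
    · rw [if_pos h, PySem.Dict.getD_of_not_contains inv 0 h, zero_add]
    · rw [if_neg h]; rfl
  rw [hbody, PySem.Dict.keys_counter]
  -- both sides are dicts with Nodup keys; compare keys and lookups
  have hkeysL := PySem.Dict.keys_foldl_insert (PySem.Set.ofList xs)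
      (fun d i => d.getD i 0 + (xs.count i : Int)) d
  have hkeysR := PySem.Dict.keys_foldl_insert xs
      (fun d i => d.getD i 0 + 1) d
  have hkeys : ((PySem.Set.ofList xs).foldl
        (fun d i => d.insert i (d.getD i 0 + (xs.count i : Int))) d).keys
      = (xs.foldl (fun inv item => inv.insert item (inv.getD item 0 + 1)) d).keys := by
    rw [hkeysL, hkeysR, PySem.Set.update_eq_append_filter, PySem.Set.update_eq_append_filter,
        ofList_idem]
  have hndL : ((PySem.Set.ofList xs).foldl
        (fun d i => d.insert i (d.getD i 0 + (xs.count i : Int))) d).keys.Nodup :=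
    PySem.Dict.nodup_keys_foldl_insert _ _ _ hd
  have hndR : (xs.foldl (fun inv item => inv.insert item (inv.getD item 0 + 1)) d).keys.Nodup :=
    PySem.Dict.nodup_keys_foldl_insert _ _ _ hd
  have hgetD : ∀ k, ((PySem.Set.ofList xs).foldl
        (fun d i => d.insert i (d.getD i 0 + (xs.count i : Int))) d).getD k 0
      = (xs.foldl (fun inv item => inv.insert item (inv.getD item 0 + 1)) d).getD k 0 := by
    intro k
    rw [getD_foldl_insert_g _ _ _ (PySem.Set.nodup_ofList xs) k,
        PySem.Dict.getD_foldl_insert_add_one]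
    by_cases hm : k ∈ xs
    · rw [if_pos ((PySem.Set.mem_ofList xs k).mpr hm)]
    · rw [if_neg (fun h => hm ((PySem.Set.mem_ofList xs k).mp h))]
      rw [List.count_eq_zero.mpr hm]
      simp
  apply PySem.Dict.ext
  rw [PySem.Dict.items_eq_map_keys _ hndL 0, PySem.Dict.items_eq_map_keys _ hndR 0, hkeys]
  exact List.map_congr_left (fun k _ => by rw [hgetD k])

-- ===== VERDICT (by name: the statement is the Claim_ definition above) =====
theorem addToInventory_spec : Claim_equal_addToInventory := by
  intro inventory addedItems _hdom hpre
  show addToInventory inventory addedItems = addToInventory_alt inventory addedItems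
  unfold addToInventory addToInventory_alt
  rw [list_to_dict_eq_counter]
  have hd : (PySem.Dict.mk inventory).keys.Nodup := by
    rw [PySem.Dict.keys_mk]; exact hpre
  exact congrArg PySem.Dict.items (merge_counter_eq addedItems _ hd)
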